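-- pv_equiv track=rewrite | github.com/zmqgeek/PGTS | Method/agent.py | sort_tactics
-- ===== SOURCE A (Python) =====
-- def get_tactic_name(tactic):
--     return tactic.split()[0]
--
-- def sort_tactics(prev_tactic, candidates, pattern_support):
--     prev_tactic_name = get_tactic_name(prev_tactic)
--     # prev_tactic_name = extract_base_tactic(prev_tactic)
--     candidate_with_index = [(tactic, i) for i, tactic in enumerate(candidates)]
--     matching = []
--     non_matching = []
--
--     for tactic, index in candidate_with_index:
--         tactic_name = get_tactic_name(tactic)
--         # tactic_name = extract_base_tactic(tactic)
--         if (prev_tactic_name, tactic_name) in pattern_support: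
--             matching.append((tactic, pattern_support[(prev_tactic_name, tactic_name)], index))
--         else:
--             non_matching.append((tactic, index))
--     matching.sort(key=lambda x: (x[1], x[2]))
--     non_matching.sort(key=lambda x: x[1])
--
--     sorted_matching = [tactic for tactic, _, _ in matching]
--     sorted_non_matching = [tactic for tactic, _ in non_matching]
--
--     combined = sorted_non_matching + sorted_matching
--     return combined
-- ===== SOURCE B (Python) =====
-- def sort_tactics(prev_tactic, candidates, pattern_support):
--     prev_name = prev_tactic.split()[0]
--     result = []
--     buckets = {}
--     for tactic in candidates:
--         support = pattern_support.get((prev_name, tactic.split()[0]))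
--         if support is None:
--             result.append(tactic)
--         else:
--             buckets.setdefault(support, []).append(tactic)
--     for support in sorted(buckets):
--         result.extend(buckets[support])
--     return result
-- ===== Notes on version B (the rewrite author's own statement) =====
-- stated objective: alternative
-- what changed: Instead of partitioning into two decorated lists, sorting each by comparison and concatenating, B makes one pass that appends unsupported tactics to the result and groups supported ones into dict buckets keyed by their support value, then emits the buckets in increasing order of the (few) distinct support values -- a group-by/bucket strategy with no comparison sort over the tactics themselves.
import Mathlib
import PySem

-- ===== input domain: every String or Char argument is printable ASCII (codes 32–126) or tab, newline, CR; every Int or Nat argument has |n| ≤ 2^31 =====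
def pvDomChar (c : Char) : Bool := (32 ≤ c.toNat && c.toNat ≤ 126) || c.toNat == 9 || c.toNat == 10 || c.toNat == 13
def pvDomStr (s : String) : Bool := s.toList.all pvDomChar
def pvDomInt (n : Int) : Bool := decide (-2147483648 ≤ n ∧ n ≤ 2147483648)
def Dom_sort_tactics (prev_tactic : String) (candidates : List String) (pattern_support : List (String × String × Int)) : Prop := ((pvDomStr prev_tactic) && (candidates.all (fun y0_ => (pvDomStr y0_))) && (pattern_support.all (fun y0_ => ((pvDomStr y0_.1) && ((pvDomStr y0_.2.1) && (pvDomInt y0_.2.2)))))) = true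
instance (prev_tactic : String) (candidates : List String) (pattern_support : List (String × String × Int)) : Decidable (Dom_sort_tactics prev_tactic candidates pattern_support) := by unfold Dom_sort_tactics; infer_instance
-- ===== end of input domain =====

-- B replaces A's partition / two sorts / concatenate by a single pass that appends unsupported
-- tactics to the result and groups supported ones into buckets keyed by their support value,
-- then emits the buckets in increasing support order; objective: alternative (group-by instead
-- of element sorting; same output).


-- ===== PORT A =====
-- tactic.split()[0]; Python raises IndexError when split() is empty — those inputs are
-- excluded by Pre_sort_tactics, so the `.getD ""` default is never reached under the claim.
def get_tactic_name (tactic : String) : String :=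
  (PySem.List.pyGet? (PySem.Str.split₀ tactic) 0).getD ""

-- '(a, b) in pattern_support' + 'pattern_support[(a, b)]' on the dict: first matching key.
def lookupPS (ps : List (String × String × Int)) (a b : String) : Option Int :=
  (ps.find? (fun e => e.1 == a && e.2.1 == b)).map (fun e => e.2.2)

def sort_tactics (prev_tactic : String) (candidates : List String) (pattern_support : List (String × String × Int)) : List String :=
  let prev_tactic_name := get_tactic_name prev_tactic
  let candidate_with_index := (PySem.List.enumerate candidates).map (fun p => (p.2, p.1))
  -- the for loop: appends each (tactic, index) to 'matching' (with its support) or 'non_matching'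
  let r := candidate_with_index.foldl
    (fun (acc : List (String × Int × Int) × List (String × Int)) ti =>
      let tname := get_tactic_name ti.1  -- tactic_name (the name is a reserved token in this toolchain)
      match lookupPS pattern_support prev_tactic_name tname with
      | some s => (acc.1 ++ [(ti.1, s, ti.2)], acc.2)
      | none   => (acc.1, acc.2 ++ [ti]))
    ([], [])
  let matching := PySem.List.sorted2 r.1 (fun x => x.2.1) (fun x => x.2.2)
  let non_matching := PySem.List.sorted r.2 (fun x => x.2)
  let sorted_matching := matching.map (fun x => x.1)
  let sorted_non_matching := non_matching.map (fun x => x.1)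
  sorted_non_matching ++ sorted_matching

-- ===== PORT B =====
-- pattern_support.get(k) on the dict: first matching key.
def bPsGet (ps : List (String × String × Int)) (k : String × String) : Option Int :=
  (ps.find? (fun e => e.1 == k.1 && e.2.1 == k.2)).map (fun e => e.2.2)

-- prev_tactic.split()[0] / tactic.split()[0]; IndexError inputs are excluded by Pre_sort_tactics.
def bBaseName (s : String) : String :=
  (PySem.List.pyGet? (PySem.Str.split₀ s) 0).getD ""

def sort_tactics_alt (prev_tactic : String) (candidates : List String) (pattern_support : List (String × String × Int)) : List String :=
  let prev_name := bBaseName prev_tactic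
  -- first loop: result.append(tactic) for unsupported, buckets.setdefault(support, []).append(tactic)
  -- for supported ('setdefault(..).append' is PySem.Dict.modify with default [])
  let st := candidates.foldl
    (fun (acc : List String × PySem.Dict Int (List String)) tactic =>
      match bPsGet pattern_support (prev_name, bBaseName tactic) with
      | none => (acc.1 ++ [tactic], acc.2)
      | some support => (acc.1, acc.2.modify support [] (fun b => b ++ [tactic])))
    ([], PySem.Dict.empty)
  -- 'for support in sorted(buckets): result.extend(buckets[support])'; support ranges over the
  -- dict's own keys, so the buckets[support] lookup cannot raise (getD is exact here)
  (PySem.List.sorted st.2.keys (fun v => v) false).foldl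
    (fun r v => r ++ st.2.getD v []) st.1

-- ===== PRECONDITION & SPEC =====
-- Excludes exactly the inputs where Python's split()[0] raises IndexError: prev_tactic or a
-- candidate that is empty or whitespace-only.
def Pre_sort_tactics (prev_tactic : String) (candidates : List String) (pattern_support : List (String × String × Int)) : Prop :=
  PySem.Str.split₀ prev_tactic ≠ [] ∧ ∀ t ∈ candidates, PySem.Str.split₀ t ≠ []
instance (prev_tactic : String) (candidates : List String) (pattern_support : List (String × String × Int)) : Decidable (Pre_sort_tactics prev_tactic candidates pattern_support) := by unfold Pre_sort_tactics; infer_instance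

def pvWitness_sort_tactics : String × List String × (List (String × String × Int)) :=
  ("intro x", ["apply h", "simp", "intro", "rw h"], [("intro", "simp", 2), ("intro", "rw", 1)])

def Spec_sort_tactics (prev_tactic : String) (candidates : List String) (pattern_support : List (String × String × Int)) (out : List String) : Prop := out = sort_tactics_alt prev_tactic candidates pattern_support
instance (prev_tactic : String) (candidates : List String) (pattern_support : List (String × String × Int)) (out : List String) : Decidable (Spec_sort_tactics prev_tactic candidates pattern_support out) := by unfold Spec_sort_tactics; infer_instance

-- ===== CLAIM (what is proved, stated in full; the proofs are below) =====
def Claim_equal_sort_tactics : Prop := ∀ (prev_tactic : String) (candidates : List String) (pattern_support : List (String × String × Int)), Dom_sort_tactics prev_tactic candidates pattern_support → Pre_sort_tactics prev_tactic candidates pattern_support → Spec_sort_tactics prev_tactic candidates pattern_support (sort_tactics prev_tactic candidates pattern_support)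

-- ===== LEMMAS AND PROOFS =====

theorem insertBy_append_of_not_before {α : Type} (bf : α → α → Bool) (x : α) (ys zs : List α)
    (h : ∀ y ∈ ys, bf x y = false) :
    PySem.List.insertBy bf x (ys ++ zs) = ys ++ PySem.List.insertBy bf x zs := by
  induction ys with
  | nil => rfl
  | cons y ys ih =>
    simp only [List.cons_append, PySem.List.insertBy, h y (by simp)]
    simp only [Bool.false_eq_true, if_false, List.cons.injEq, true_and]
    exact ih (fun y hy => h y (by simp [hy]))

theorem insertBy_congr_mem {α : Type} (bf1 bf2 : α → α → Bool) (x : α) (ys : List α)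
    (h : ∀ y ∈ ys, bf1 x y = bf2 x y) :
    PySem.List.insertBy bf1 x ys = PySem.List.insertBy bf2 x ys := by
  induction ys with
  | nil => rfl
  | cons y ys ih =>
    simp only [PySem.List.insertBy, h y (by simp)]
    split
    · rfl
    · simp only [List.cons.injEq, true_and]
      exact ih (fun y hy => h y (by simp [hy]))

theorem insertBy_map {α β : Type} (bf : β → β → Bool) (f : α → β) (x : α) (ys : List α) :
    PySem.List.insertBy bf (f x) (ys.map f)
      = (PySem.List.insertBy (fun a b => bf (f a) (f b)) x ys).map f := by
  induction ys with
  | nil => rfl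
  | cons y ys ih =>
    simp only [List.map_cons, PySem.List.insertBy]
    split <;> simp_all

theorem sorted_concat {α κ : Type} [LT κ] [DecidableLT κ] (l : List α) (x : α) (key : α → κ) :
    PySem.List.sorted (l ++ [x]) key false
      = PySem.List.insertBy (fun a b => decide (key a < key b)) x (PySem.List.sorted l key false) := by
  simp [PySem.List.sorted, List.foldl_append]

theorem sorted2_concat {α : Type} (l : List α) (x : α) (k1 k2 : α → Int) :
    PySem.List.sorted2 (l ++ [x]) k1 k2 false
      = PySem.List.insertBy
          (fun a b => decide (k1 a < k1 b) || !decide (k1 b < k1 a) && decide (k2 a < k2 b))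
          x (PySem.List.sorted2 l k1 k2 false) := by
  simp [PySem.List.sorted2, List.foldl_append]

-- a stable sort of mapped elements is the map of the stable sort under the composed key
theorem sorted_map_comm {α β : Type} (f : α → β) (key : β → Int) (l : List α) :
    PySem.List.sorted (l.map f) key false
      = (PySem.List.sorted l (fun a => key (f a)) false).map f := by
  induction l using List.reverseRecOn with
  | nil => rfl
  | append_singleton l x ih =>
    simp only [List.map_append, List.map_cons, List.map_nil, sorted_concat, ih]
    exact insertBy_map _ f x _

-- Python's sorted(key=(k1, k2)) equals sorted(key=k1) on a list whose k2 values strictly increase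
theorem sorted2_eq_sorted_of_pairwise {α : Type} (l : List α) (k1 k2 : α → Int)
    (h : l.Pairwise (fun a b => k2 a < k2 b)) :
    PySem.List.sorted2 l k1 k2 false = PySem.List.sorted l k1 false := by
  induction l using List.reverseRecOn with
  | nil => rfl
  | append_singleton l x ih =>
    rw [List.pairwise_append] at h
    obtain ⟨hl, -, hcross⟩ := h
    rw [sorted2_concat, sorted_concat, ih hl]
    apply insertBy_congr_mem
    intro y hy
    rw [PySem.List.mem_sorted] at hy
    have h2 : k2 y < k2 x := hcross y hy x (by simp)
    have : decide (k2 x < k2 y) = false := by simp; omega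
    simp only [this, Bool.and_false, Bool.or_false]

-- inserting an element smaller (under the comparator) than everything present goes in front
theorem insertBy_of_forall_before {α : Type} (bf : α → α → Bool) (x : α) (m : List α)
    (h : ∀ y ∈ m, bf x y = true) :
    PySem.List.insertBy bf x m = x :: m := by
  cases m with
  | nil => rfl
  | cons y t => simp [PySem.List.insertBy, h y (by simp)]

theorem flatMap_congr_mem {α β : Type} (l : List α) (f g : α → List β)
    (h : ∀ a ∈ l, f a = g a) : l.flatMap f = l.flatMap g := by
  induction l with
  | nil => rfl
  | cons a l ih => simp [List.flatMap_cons, h a (by simp), ih (fun a ha => h a (by simp [ha]))]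

-- stable insertion into a concatenation of key-homogeneous buckets over strictly increasing key
-- values lands at the end of x's own bucket
theorem insertBy_flatMap_buckets {α : Type} (key : α → Int) (x : α) (ks : List Int)
    (B : Int → List α) (hasc : ks.Pairwise (fun a b => a < b)) (hmem : key x ∈ ks)
    (hB : ∀ v, ∀ y ∈ B v, key y = v) :
    PySem.List.insertBy (fun a b => decide (key a < key b)) x (ks.flatMap B)
      = ks.flatMap (fun v => B v ++ if key x = v then [x] else []) := by
  induction ks with
  | nil => cases hmem
  | cons v ks ih =>
    rw [List.pairwise_cons] at hasc
    obtain ⟨hvlt, hasc'⟩ := hasc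
    simp only [List.flatMap_cons]
    by_cases hv : key x = v
    · have hskip : ∀ y ∈ B v, (decide (key x < key y)) = false := by
        intro y hy; have := hB v y hy; simp [this, hv]
      rw [insertBy_append_of_not_before _ _ _ _ hskip]
      have hfront : PySem.List.insertBy (fun a b => decide (key a < key b)) x (ks.flatMap B)
          = x :: ks.flatMap B := by
        apply insertBy_of_forall_before
        intro y hy
        rw [List.mem_flatMap] at hy
        obtain ⟨v', hv', hyv'⟩ := hy
        have : key y = v' := hB v' y hyv'
        have : key x < key y := by rw [this, hv]; exact hvlt v' hv'
        simpa using this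
      rw [hfront, if_pos hv]
      have : ks.flatMap (fun v' => B v' ++ if key x = v' then [x] else []) = ks.flatMap B := by
        apply flatMap_congr_mem
        intro v' hv'
        have : key x ≠ v' := by have := hvlt v' hv'; omega
        simp [this]
      rw [this]
      simp
    · have hmem' : key x ∈ ks := by cases hmem with
        | head => exact absurd rfl hv
        | tail _ h => exact h
      have hgt : v < key x := hvlt _ hmem'
      have hskip : ∀ y ∈ B v, (decide (key x < key y)) = false := by
        intro y hy; have := hB v y hy; simp [this]; omega
      rw [insertBy_append_of_not_before _ _ _ _ hskip, ih hasc' hmem', if_neg hv]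
      simp

-- a stable sort by an Int key is the concatenation, over the ascending distinct key values, of
-- the key's fibres in original order (the group-by characterisation of stable sorting)
theorem sorted_eq_flatMap_fibres {α : Type} (l : List α) (key : α → Int) (ks : List Int)
    (hasc : ks.Pairwise (fun a b => a < b)) (hcov : ∀ t ∈ l, key t ∈ ks) :
    PySem.List.sorted l key false = ks.flatMap (fun v => l.filter (fun t => key t = v)) := by
  induction l using List.reverseRecOn with
  | nil =>
    show ([] : List α) = _
    induction ks with
    | nil => rfl
    | cons v ks ihk =>
      rw [List.flatMap_cons, List.filter_nil, List.nil_append]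
      exact ihk (hasc.sublist (List.sublist_cons_self v ks)) (by simp)
  | append_singleton l x ih =>
    rw [sorted_concat, ih (fun t ht => hcov t (by simp [ht]))]
    rw [insertBy_flatMap_buckets key x ks _ hasc (hcov x (by simp))
      (by intro v y hy; exact of_decide_eq_true ((List.mem_filter.mp hy).2))]
    apply flatMap_congr_mem
    intro v _
    rw [List.filter_append]
    simp [List.filter_singleton]

-- A's for loop: the pair of accumulators is append of the filtered/mapped input
theorem foldA_char (L : String → Option Int) (l : List (String × Int))
    (m : List (String × Int × Int)) (nm : List (String × Int)) :
    l.foldl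
      (fun (acc : List (String × Int × Int) × List (String × Int)) ti =>
        match L ti.1 with
        | some s => (acc.1 ++ [(ti.1, s, ti.2)], acc.2)
        | none   => (acc.1, acc.2 ++ [ti]))
      (m, nm)
      = (m ++ (l.filter (fun ti => (L ti.1).isSome)).map (fun ti => (ti.1, (L ti.1).getD 0, ti.2)),
         nm ++ l.filter (fun ti => !(L ti.1).isSome)) := by
  induction l generalizing m nm with
  | nil => simp
  | cons ti l ih =>
    cases h : L ti.1 with
    | none => simp [List.foldl_cons, h, ih]
    | some s => simp [List.foldl_cons, h, ih]

-- B's first loop: result collects the unsupported tactics in order; the dict is the bucket loop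
-- over the supported ones
theorem foldB_char (L : String → Option Int) (l : List String)
    (res : List String) (d : PySem.Dict Int (List String)) :
    l.foldl
      (fun (acc : List String × PySem.Dict Int (List String)) t =>
        match L t with
        | none => (acc.1 ++ [t], acc.2)
        | some support => (acc.1, acc.2.modify support [] (fun b => b ++ [t])))
      (res, d)
      = (res ++ l.filter (fun t => !(L t).isSome),
         (l.filter (fun t => (L t).isSome)).foldl
           (fun d t => d.modify ((L t).getD 0) [] (fun b => b ++ [t])) d) := by
  induction l generalizing res d with
  | nil => simp
  | cons t l ih =>
    cases h : L t with
    | none => simp [List.foldl_cons, h, ih]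
    | some s => simp [List.foldl_cons, h, ih]

-- the (tactic, index) decoration: projecting a filtered decorated list back to the tactics
theorem filter_swap_enumerate (pr : String → Bool) (xs : List String) (s : Int) :
    (((PySem.List.enumerate xs s).map (fun p => (p.2, p.1))).filter (fun q => pr q.1)).map (fun q => q.1)
      = xs.filter pr := by
  induction xs generalizing s with
  | nil => rfl
  | cons x xs ih =>
    rw [PySem.List.enumerate_cons]
    by_cases hp : pr x = true <;> simp [hp, ih]

theorem pairwise_idx_filter (pr : (String × Int) → Bool) (xs : List String) (s : Int) :
    ((((PySem.List.enumerate xs s).map (fun p => (p.2, p.1))).filter pr)).Pairwise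
      (fun a b => a.2 < b.2) := by
  apply List.Pairwise.filter
  rw [List.pairwise_map]
  exact PySem.List.pairwise_lt_enumerate xs s

theorem sort_tactics_eq (prev_tactic : String) (candidates : List String)
    (pattern_support : List (String × String × Int)) :
    sort_tactics prev_tactic candidates pattern_support
      = sort_tactics_alt prev_tactic candidates pattern_support := by
  -- shared notation: L t = support lookup for tactic t, p t = matched, sval t = its support
  set L : String → Option Int :=
    fun t => lookupPS pattern_support (get_tactic_name prev_tactic) (get_tactic_name t) with hL
  have hBget : ∀ t, bPsGet pattern_support (bBaseName prev_tactic, bBaseName t) = L t := fun t => rfl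
  set p : String → Bool := fun t => (L t).isSome with hp
  set sval : String → Int := fun t => (L t).getD 0 with hsval
  set matched := candidates.filter p with hmatched
  -- A: evaluate the fold, kill the index sort, commute the maps with the support sort
  have hA : sort_tactics prev_tactic candidates pattern_support
      = candidates.filter (fun t => !p t) ++ PySem.List.sorted matched sval false := by
    show (PySem.List.sorted _ _ false).map _ ++ (PySem.List.sorted2 _ _ _ false).map _ = _
    rw [foldA_char L]
    set cwi := (PySem.List.enumerate candidates 0).map (fun p => (p.2, p.1)) with hcwi
    have hnm : PySem.List.sorted (cwi.filter (fun ti => !(L ti.1).isSome)) (fun x => x.2) false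
        = cwi.filter (fun ti => !(L ti.1).isSome) := by
      apply PySem.List.sorted_eq_self_of_pairwise
      exact (pairwise_idx_filter _ candidates 0).imp (fun h => le_of_lt h)
    have hmt : PySem.List.sorted2
          ((cwi.filter (fun ti => (L ti.1).isSome)).map (fun ti => (ti.1, (L ti.1).getD 0, ti.2)))
          (fun x => x.2.1) (fun x => x.2.2) false
        = PySem.List.sorted
          ((cwi.filter (fun ti => (L ti.1).isSome)).map (fun ti => (ti.1, (L ti.1).getD 0, ti.2)))
          (fun x => x.2.1) false := by
      apply sorted2_eq_sorted_of_pairwise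
      rw [List.pairwise_map]
      exact pairwise_idx_filter _ candidates 0
    rw [List.nil_append, List.nil_append, hnm, hmt, sorted_map_comm, List.map_map]
    have hfl : (cwi.filter (fun ti => !(L ti.1).isSome)).map (fun q => q.1)
        = candidates.filter (fun t => !(L t).isSome) :=
      filter_swap_enumerate (fun t => !(L t).isSome) candidates 0
    have hfr : (cwi.filter (fun ti => (L ti.1).isSome)).map (fun q => q.1)
        = candidates.filter (fun t => (L t).isSome) :=
      filter_swap_enumerate (fun t => (L t).isSome) candidates 0
    rw [hfl,
        show matched = (cwi.filter (fun ti => (L ti.1).isSome)).map (fun q => q.1) from hfr.symm,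
        sorted_map_comm]
    rfl
  -- B: evaluate the two loops; the dict's buckets are the fibres of sval over matched
  set bd := matched.foldl (fun d t => d.modify (sval t) [] (fun b => b ++ [t]))
      (PySem.Dict.empty : PySem.Dict Int (List String)) with hbd
  have hkeys : bd.keys = PySem.Set.ofList (matched.map sval) := by
    rw [hbd, PySem.Dict.keys_foldl_modify_key matched sval [] (fun _ t => fun b => b ++ [t]) _,
        PySem.Dict.keys_empty, PySem.Set.update_nil_left]
  have hget : ∀ v, bd.getD v [] = matched.filter (fun t => sval t = v) := by
    intro v
    rw [hbd, show matched.foldl (fun d t => d.modify (sval t) [] (fun b => b ++ [t]))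
          (PySem.Dict.empty : PySem.Dict Int (List String))
        = (matched.map (fun t => (sval t, t))).foldl
            (fun d q => d.modify q.1 [] (fun b => b ++ [q.2])) PySem.Dict.empty
      from by rw [List.foldl_map]]
    rw [PySem.Dict.getD_foldl_modify_append, PySem.Dict.getD_empty, List.nil_append]
    simp only [List.filter_map, List.map_map, Function.comp_def, List.map_id']
    apply List.filter_congr
    intro t _
    by_cases h : sval t = v <;> simp [h]
  -- B: evaluate the two loops
  have hfold :
      candidates.foldl
        (fun (acc : List String × PySem.Dict Int (List String)) tactic =>
          match bPsGet pattern_support (bBaseName prev_tactic, bBaseName tactic) with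
          | none => (acc.1 ++ [tactic], acc.2)
          | some support => (acc.1, acc.2.modify support [] (fun b => b ++ [tactic])))
        ([], PySem.Dict.empty)
      = (candidates.filter (fun t => !p t), bd) :=
    foldB_char L candidates [] PySem.Dict.empty
  have hB : sort_tactics_alt prev_tactic candidates pattern_support
      = candidates.filter (fun t => !p t)
        ++ (PySem.List.sorted bd.keys (fun v => v) false).flatMap (fun v => bd.getD v []) := by
    simp only [sort_tactics_alt]
    rw [hfold]
    exact PySem.List.foldl_append_eq_flatMap _ _ _
  rw [hA, hB]
  congr 1
  rw [hkeys]
  rw [sorted_eq_flatMap_fibres matched sval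
        (PySem.List.sorted (PySem.Set.ofList (matched.map sval)) (fun v => v) false)
        (PySem.List.sorted_ofList_pairwise_lt _)
        (by intro t ht
            rw [PySem.List.mem_sorted, PySem.Set.mem_ofList]
            exact List.mem_map.mpr ⟨t, ht, rfl⟩)]
  exact flatMap_congr_mem _ _ _ (fun v _ => (hget v).symm)

-- ===== VERDICT (by name: the statement is the Claim_ definition above) =====
theorem sort_tactics_spec : Claim_equal_sort_tactics := by
  intro prev_tactic candidates pattern_support _ _
  unfold Spec_sort_tactics
  exact sort_tactics_eq prev_tactic candidates pattern_support
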